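-- pv_equiv track=rewrite | github.com/TheAlgorithms/JavaScript | sort-users.py | get_user_list
-- ===== SOURCE A (Python) =====
-- def get_user_list(lines):
--     username_list = []
--     for line in lines:
--         username_chars = []
--         start_chars = ['-', ' ', '[', '@']
--         for letter in line:
--             if letter not in start_chars:
--                 if letter == ']':
--                     break
--                 username_chars.append(letter)
--         username = ''.join(username_chars)
--         username_list.append(username)
--     return username_list
-- ===== SOURCE B (Python) =====
-- def get_user_list(lines):
--     deletions = str.maketrans('', '', '- [@')
--     return [line.split(']')[0].translate(deletions) for line in lines]
-- ===== Notes on version B (the rewrite author's own statement) =====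
-- stated objective: simpler
-- what changed: Replaces the per-character skip/append/break loop with a locate-delimiter (split(']')[0]) then bulk-delete (str.translate) comprehension.
import Mathlib
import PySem

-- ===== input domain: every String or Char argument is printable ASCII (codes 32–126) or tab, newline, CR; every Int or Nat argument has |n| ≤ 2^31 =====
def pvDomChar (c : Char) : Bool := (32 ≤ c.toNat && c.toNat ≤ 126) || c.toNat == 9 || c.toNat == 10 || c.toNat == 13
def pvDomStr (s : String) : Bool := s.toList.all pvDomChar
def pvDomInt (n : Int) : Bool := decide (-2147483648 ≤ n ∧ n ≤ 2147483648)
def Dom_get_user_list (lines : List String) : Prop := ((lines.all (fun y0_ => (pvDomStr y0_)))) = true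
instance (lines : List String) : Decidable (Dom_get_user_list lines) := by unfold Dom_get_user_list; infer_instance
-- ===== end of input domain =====

-- B replaces A's per-character skip/append/break loop with a split-before-']' then bulk-delete shape (simpler decomposition, same cost).


-- ===== PORT A =====
-- inner char loop of A: skip chars in ['-',' ','[','@'], break at ']', else append
def getUserLoopA : List Char → List Char → List Char
  | [], acc => acc.reverse
  | c :: rest, acc =>
    if ¬ (c = '-' ∨ c = ' ' ∨ c = '[' ∨ c = '@') then
      if c = ']' then acc.reverse
      else getUserLoopA rest (c :: acc)
    else getUserLoopA rest acc

def get_user_list (lines : List String) : List String :=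
  lines.foldl (fun username_list line =>
    username_list ++ [String.mk (getUserLoopA line.toList [])]) []

-- ===== PORT B =====
-- split(']')[0] = the prefix before the first ']' (takeWhile); translate deleting '- [@' = filter out those four chars (exact)
def get_user_list_alt (lines : List String) : List String :=
  lines.map (fun line =>
    String.mk (((line.toList.takeWhile (fun c => c ≠ ']')).filter
      (fun c => ¬ (c = '-' ∨ c = ' ' ∨ c = '[' ∨ c = '@')))))

-- ===== PRECONDITION & SPEC =====
def Spec_get_user_list (lines : List String) (out : List String) : Prop := out = get_user_list_alt lines
instance (lines : List String) (out : List String) : Decidable (Spec_get_user_list lines out) := by unfold Spec_get_user_list; infer_instance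

-- ===== CLAIM (what is proved, stated in full; the proofs are below) =====
def Claim_equal_get_user_list : Prop := ∀ (lines : List String), Dom_get_user_list lines → Spec_get_user_list lines (get_user_list lines)

-- ===== LEMMAS AND PROOFS =====
theorem getUserLoopA_eq (cs acc : List Char) :
    getUserLoopA cs acc =
      acc.reverse ++ ((cs.takeWhile (fun c => c ≠ ']')).filter
        (fun c => ¬ (c = '-' ∨ c = ' ' ∨ c = '[' ∨ c = '@'))) := by
  induction cs generalizing acc with
  | nil => simp [getUserLoopA]
  | cons c rest ih =>
    by_cases hskip : c = '-' ∨ c = ' ' ∨ c = '[' ∨ c = '@'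
    · rcases hskip with h|h|h|h <;> subst h <;>
        simp [getUserLoopA, ih, List.takeWhile]
    · by_cases hbr : c = ']'
      · subst hbr
        simp [getUserLoopA, List.takeWhile]
      · push_neg at hskip
        obtain ⟨h1, h2, h3, h4⟩ := hskip
        simp [getUserLoopA, ih, List.takeWhile, List.filter_cons, h1, h2, h3, h4, hbr]

theorem get_user_list_foldl (lines : List String) (acc : List String) :
    lines.foldl (fun username_list line =>
      username_list ++ [String.mk (getUserLoopA line.toList [])]) acc =
    acc ++ lines.map (fun line => String.mk (getUserLoopA line.toList [])) := by
  induction lines generalizing acc with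
  | nil => simp
  | cons l rest ih => simp [List.foldl, ih]

-- ===== VERDICT (by name: the statement is the Claim_ definition above) =====
theorem get_user_list_spec : Claim_equal_get_user_list := by
  intro lines _
  unfold Spec_get_user_list get_user_list get_user_list_alt
  rw [get_user_list_foldl]
  simp [getUserLoopA_eq]
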